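-- pv_equiv track=rewrite | github.com/yurachampion/tacohamingway | scripts/merge_content_into_html.py | position_to_line_offset
-- ===== SOURCE A (Python) =====
-- def position_to_line_offset(lines, pos):
--     """По позиции pos в полном тексте (lines, join \\n) возвращает (line_idx, start_in_line, end_in_line) для конца фрагмента длиной 0 (точка)."""
--     current = 0
--     for line_idx, line in enumerate(lines):
--         line_len = len(line) + (1 if line_idx < len(lines) - 1 else 0)
--         if current + len(line) > pos:
--             start_in_line = pos - current
--             return (line_idx, start_in_line)
--         current += line_len
--     return (len(lines) - 1, 0)
-- ===== SOURCE B (Python) =====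
-- def position_to_line_offset(lines, pos):
--     # Prefix tables + binary search for the first line whose content-end exceeds pos.
--     n = len(lines)
--     starts = [0] * n
--     ends = [0] * n
--     acc = 0
--     for i in range(n):
--         starts[i] = acc
--         ends[i] = acc + len(lines[i])
--         acc = ends[i] + 1
--     lo, hi = 0, n
--     while lo < hi:
--         mid = (lo + hi) // 2
--         if ends[mid] > pos:
--             hi = mid
--         else:
--             lo = mid + 1
--     if lo < n:
--         return (lo, pos - starts[lo])
--     return (n - 1, 0)
-- ===== Notes on version B (the rewrite author's own statement) =====
-- stated objective: alternative
-- what changed: Replaces A's single accumulating linear scan with a one-pass build of prefix start/content-end tables followed by a hand-written binary search for the first line whose content-end exceeds pos.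
import Mathlib
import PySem

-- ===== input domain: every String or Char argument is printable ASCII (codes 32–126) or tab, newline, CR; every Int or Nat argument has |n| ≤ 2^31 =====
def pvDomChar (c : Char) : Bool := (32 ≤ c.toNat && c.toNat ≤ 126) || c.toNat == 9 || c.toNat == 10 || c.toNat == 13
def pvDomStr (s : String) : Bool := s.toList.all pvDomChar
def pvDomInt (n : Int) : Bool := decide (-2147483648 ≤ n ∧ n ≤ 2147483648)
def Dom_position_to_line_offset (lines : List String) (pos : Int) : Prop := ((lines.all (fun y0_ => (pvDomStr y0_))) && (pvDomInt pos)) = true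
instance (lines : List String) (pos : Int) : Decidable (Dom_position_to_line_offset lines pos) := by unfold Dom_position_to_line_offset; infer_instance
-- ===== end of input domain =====

-- B replaces A's accumulating linear scan by prefix start/end tables plus a binary search
-- (objective: alternative decomposition, same exact return value).

-- ===== PORT A =====
-- the enumerate loop of A, carrying (idx, current); the bare `lines` argument only feeds len(lines)
def pvAGo (lines : List String) (pos : Int) : List String → Nat → Int → Int × Int
  | [], _, _ => ((lines.length : Int) - 1, 0)
  | line :: rest, idx, current =>
    let lineLen : Int := PySem.Str.len line + (if (idx : Int) < (lines.length : Int) - 1 then 1 else 0)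
    if current + PySem.Str.len line > pos then ((idx : Int), pos - current)
    else pvAGo lines pos rest (idx + 1) (current + lineLen)

def position_to_line_offset (lines : List String) (pos : Int) : Int × Int :=
  pvAGo lines pos lines 0 0

-- ===== PORT B =====
-- Source B's table-building loop: returns (starts, ends), acc threaded exactly as in the Python loop
def pvBTables : List String → Int → List Int × List Int
  | [], _ => ([], [])
  | line :: rest, acc =>
    let e := acc + PySem.Str.len line
    let t := pvBTables rest (e + 1)
    (acc :: t.1, e :: t.2)

-- Source B's while-loop binary search; ends[mid] is always in range (lo ≤ mid < hi ≤ |ends|), so getD is exact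
def pvBSearch (ends : List Int) (pos : Int) (lo hi : Nat) : Nat :=
  if h : lo < hi then
    let mid := (lo + hi) / 2
    if pos < ends.getD mid 0 then pvBSearch ends pos lo mid
    else pvBSearch ends pos (mid + 1) hi
  else lo
termination_by hi - lo
decreasing_by all_goals omega

def position_to_line_offset_alt (lines : List String) (pos : Int) : Int × Int :=
  let t := pvBTables lines 0
  let lo := pvBSearch t.2 pos 0 lines.length
  if lo < lines.length then ((lo : Int), pos - t.1.getD lo 0)
  else ((lines.length : Int) - 1, 0)

-- ===== PRECONDITION & SPEC =====
def Spec_position_to_line_offset (lines : List String) (pos : Int) (out : Int × Int) : Prop := out = position_to_line_offset_alt lines pos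
instance (lines : List String) (pos : Int) (out : Int × Int) : Decidable (Spec_position_to_line_offset lines pos out) := by unfold Spec_position_to_line_offset; infer_instance

-- ===== CLAIM (what is proved, stated in full; the proofs are below) =====
def Claim_equal_position_to_line_offset : Prop := ∀ (lines : List String) (pos : Int), Dom_position_to_line_offset lines pos → Spec_position_to_line_offset lines pos (position_to_line_offset lines pos)

-- ===== LEMMAS AND PROOFS =====

theorem pvBTables_len (ls : List String) (acc : Int) :
    (pvBTables ls acc).1.length = ls.length ∧ (pvBTables ls acc).2.length = ls.length := by
  induction ls generalizing acc with
  | nil => simp [pvBTables]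
  | cons l t ih => simp [pvBTables, ih]

theorem pvEnds_lb (ls : List String) (acc : Int) (i : Nat) (hi : i < ls.length) :
    acc ≤ (pvBTables ls acc).2.getD i 0 := by
  induction ls generalizing acc i with
  | nil => simp at hi
  | cons l t ih =>
    cases i with
    | zero => simp [pvBTables]
    | succ j =>
      have := ih (acc + PySem.Str.len l + 1) j (by simpa using hi)
      have h0 : (0:Int) ≤ PySem.Str.len l := by simp [PySem.Str.len_eq]
      simp only [pvBTables, List.getD_cons_succ]
      omega

theorem pvEnds_mono (ls : List String) (acc : Int) (i j : Nat) (hij : i < j) (hj : j < ls.length) :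
    (pvBTables ls acc).2.getD i 0 < (pvBTables ls acc).2.getD j 0 := by
  induction ls generalizing acc i j with
  | nil => simp at hj
  | cons l t ih =>
    cases j with
    | zero => omega
    | succ j' =>
      cases i with
      | zero =>
        have := pvEnds_lb t (acc + PySem.Str.len l + 1) j' (by simpa using hj)
        simp only [pvBTables, List.getD_cons_zero, List.getD_cons_succ]
        omega
      | succ i' =>
        have := ih (acc + PySem.Str.len l + 1) i' j' (by omega) (by simpa using hj)
        simpa [pvBTables] using this

-- findIdx is the unique k with "all earlier fail, k = length or k-th holds"
theorem findIdx_char (p : Int → Bool) (es : List Int) (k : Nat) (hk : k ≤ es.length)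
    (h1 : ∀ i, i < k → ¬ p (es.getD i 0)) (h2 : k = es.length ∨ p (es.getD k 0)) :
    es.findIdx p = k := by
  induction es generalizing k with
  | nil =>
    simp only [List.length_nil, Nat.le_zero] at hk
    simp [hk]
  | cons e t ih =>
    cases k with
    | zero =>
      rcases h2 with h | h
      · simp at h
      · simp only [List.getD_cons_zero] at h
        simp [List.findIdx_cons, h]
    | succ k' =>
      have hne : ¬ p e := by simpa using h1 0 (by omega)
      have := ih k' (by simpa using hk)
        (fun i hi => by simpa using h1 (i+1) (by omega))
        (by rcases h2 with h | h
            · left; simpa using h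
            · right; simpa using h)
      simp [List.findIdx_cons, hne, this]

theorem pvBSearch_stop (es : List Int) (pos : Int) (hi : Nat) (hhl : hi ≤ es.length)
    (h1 : ∀ i, i < hi → ¬ pos < es.getD i 0)
    (h2 : ∀ i, hi ≤ i → i < es.length → pos < es.getD i 0) :
    es.findIdx (fun e => decide (pos < e)) = hi := by
  refine findIdx_char _ es hi hhl (fun i hi' => by simpa using h1 i hi') ?_
  by_cases h : hi = es.length
  · left; exact h
  · right; simpa using h2 hi (le_refl _) (by omega)

theorem pvBSearch_eq (es : List Int) (pos : Int)
    (mono : ∀ i j, i < j → j < es.length → es.getD i 0 < es.getD j 0) :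
    ∀ k lo hi, hi - lo ≤ k → lo ≤ hi → hi ≤ es.length →
      (∀ i, i < lo → ¬ pos < es.getD i 0) →
      (∀ i, hi ≤ i → i < es.length → pos < es.getD i 0) →
      pvBSearch es pos lo hi = es.findIdx (fun e => decide (pos < e)) := by
  intro k
  induction k with
  | zero =>
    intro lo hi hk hlh hhl h1 h2
    have heq : lo = hi := by omega
    rw [pvBSearch]
    simp only [heq, lt_irrefl, dite_false]
    exact (pvBSearch_stop es pos hi hhl (fun i hi' => h1 i (by omega)) h2).symm
  | succ k' ih =>
    intro lo hi hk hlh hhl h1 h2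
    by_cases h : lo < hi
    · rw [pvBSearch]
      simp only [h, dite_true]
      set mid := (lo + hi) / 2 with hmid
      have hmlt : mid < hi := by omega
      have hmge : lo ≤ mid := by omega
      by_cases hp : pos < es.getD mid 0
      · simp only [hp, if_true]
        exact ih lo mid (by omega) (by omega) (by omega) h1
          (fun i hmi hil => by
            rcases Nat.lt_or_ge mid i with hlt | hge
            · exact lt_trans hp (mono mid i hlt hil)
            · have : i = mid := by omega
              simpa [this] using hp)
      · simp only [hp, if_false]
        exact ih (mid + 1) hi (by omega) (by omega) (by omega)
          (fun i hi' => by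
            rcases Nat.lt_or_ge i lo with hlt | hge
            · exact h1 i hlt
            · rcases Nat.lt_or_ge i mid with hlt2 | hge2
              · intro hc
                exact hp (lt_trans hc (mono i mid hlt2 (by omega)))
              · have : i = mid := by omega
                simpa [this] using hp)
          h2
    · have heq : lo = hi := by omega
      rw [pvBSearch]
      simp only [h, dite_false]
      rw [heq]
      exact (pvBSearch_stop es pos hi hhl (fun i hi' => h1 i (by omega)) h2).symm

-- the common "first content-end > pos" formulation both programs reduce to
def pvRef (n : Nat) (pos : Int) (rest : List String) (idx : Nat) (cur : Int) : Int × Int :=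
  let t := pvBTables rest cur
  let k := t.2.findIdx (fun e => decide (pos < e))
  if k < rest.length then (((idx + k : Nat) : Int), pos - t.1.getD k 0)
  else ((n : Int) - 1, 0)

theorem pvRef_cons (n : Nat) (pos : Int) (line : String) (rest : List String) (idx : Nat)
    (cur : Int) (hnp : ¬ pos < cur + PySem.Str.len line) :
    pvRef n pos (line :: rest) idx cur = pvRef n pos rest (idx + 1) (cur + PySem.Str.len line + 1) := by
  have hb : (decide (pos < cur + PySem.Str.len line)) = false := by simpa using hnp
  simp only [pvRef, pvBTables, List.findIdx_cons, hb, cond_false]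
  by_cases hk : (List.findIdx (fun e => decide (pos < e))
      (pvBTables rest (cur + PySem.Str.len line + 1)).2) < rest.length
  · rw [if_pos (show _ + 1 < (line :: rest).length from by simpa using Nat.succ_lt_succ hk),
      if_pos hk]
    simp only [List.getD_cons_succ, Prod.mk.injEq]
    constructor
    · push_cast; ring
    · trivial
  · rw [if_neg (fun h => hk (by simpa using Nat.lt_of_succ_lt_succ h)), if_neg hk]

theorem pvRef_head (n : Nat) (pos : Int) (line : String) (rest : List String) (idx : Nat)
    (cur : Int) (hp : pos < cur + PySem.Str.len line) :
    pvRef n pos (line :: rest) idx cur = ((idx : Int), pos - cur) := by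
  have hb : decide (pos < cur + ((line.length : Int))) = true := by
    simpa [PySem.Str.len] using hp
  simp [pvRef, pvBTables, List.findIdx_cons, hb]

-- A's scan equals the first-index formulation over the tables of the remaining suffix
theorem pvAGo_eq (lines : List String) (pos : Int) :
    ∀ (rest : List String) (idx : Nat) (cur : Int), idx + rest.length = lines.length →
      pvAGo lines pos rest idx cur = pvRef lines.length pos rest idx cur := by
  intro rest
  induction rest with
  | nil => intro idx cur _; simp [pvAGo, pvRef, pvBTables]
  | cons line rest' ih =>
    intro idx cur hlen
    by_cases hp : pos < cur + PySem.Str.len line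
    · rw [pvAGo, pvRef_head _ _ _ _ _ _ hp, if_pos hp]
    · rw [pvAGo, if_neg hp, pvRef_cons _ _ _ _ _ _ hp]
      cases rest' with
      | nil =>
        have hidx : ¬ ((idx : Int) < (lines.length : Int) - 1) := by
          simp at hlen; omega
        rw [if_neg hidx]
        simp [pvAGo, pvRef, pvBTables]
      | cons l2 r2 =>
        have hidx : (idx : Int) < (lines.length : Int) - 1 := by
          simp at hlen; omega
        rw [if_pos hidx]
        rw [show cur + (PySem.Str.len line + 1) = cur + PySem.Str.len line + 1 from by ring]
        exact ih (idx + 1) (cur + PySem.Str.len line + 1) (by simp at hlen ⊢; omega)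

-- ===== VERDICT (by name: the statement is the Claim_ definition above) =====
theorem position_to_line_offset_spec : Claim_equal_position_to_line_offset := by
  intro lines pos _
  unfold Spec_position_to_line_offset position_to_line_offset position_to_line_offset_alt
  rw [pvAGo_eq lines pos lines 0 0 (by simp)]
  have hb := pvBSearch_eq (pvBTables lines 0).2 pos
    (fun i j hij hj => pvEnds_mono lines 0 i j hij (by rw [(pvBTables_len lines 0).2] at hj; exact hj))
    lines.length 0 lines.length (by omega) (by omega)
    (by rw [(pvBTables_len lines 0).2])
    (fun i hi => by omega)
    (fun i hi hil => by rw [(pvBTables_len lines 0).2] at hil; omega)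
  simp only [pvRef, hb, Nat.zero_add]
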